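-- pv_equiv track=rewrite | github.com/devium/tiled-autotile | subtile_combinations.py | reorder_combinations
-- ===== SOURCE A (Python) =====
-- TILED_TERRAIN_WIDTH = 7
--
-- REORDERING = (
--     # 3x3.
--     ((0, 0), (0, 0)),
--     ((4, 0), (1, 0)),
--     ((5, 0), (2, 0)),
--     ((1, 1), (0, 1)),
--     ((5, 1), (1, 1)),
--     ((6, 1), (2, 1)),
--     ((3, 1), (0, 2)),
--     ((0, 2), (1, 2)),
--     ((1, 2), (2, 2)),
--
--     # Single-tile vertical.
--     ((1, 0), (3, 0)),
--     ((2, 1), (3, 1)),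
--     ((4, 1), (3, 2)),
--
--     # Single-tile horizontal.
--     ((2, 0), (0, 3)),
--     ((6, 0), (1, 3)),
--     ((0, 1), (2, 3)),
--
--     # Preview 1x1 tile.
--     ((3, 0), (3, 3)),
--
--     # Terrain-only from here on.
--     # 3x3 with four islands.
--     ((2, 4), (4, 0)),
--     ((3, 4), (5, 0)),
--     ((4, 3), (6, 0)),
--     ((4, 4), (4, 1)),
--     ((4, 6), (5, 1)),
--     ((0, 5), (6, 1)),
--     ((5, 3), (4, 2)),
--     ((1, 5), (5, 2)),
--     ((6, 4), (6, 2)),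
--
--     # 3x2 channel with two islands.
--     ((5, 2), (4, 3)),
--     ((6, 2), (5, 3)),
--     ((3, 2), (6, 3)),
--     ((1, 4), (4, 4)),
--     ((6, 5), (5, 4)),
--     ((5, 5), (6, 4)),
--
--     # 2x3 channel with two islands.
--     ((2, 3), (0, 4)),
--     ((0, 4), (1, 4)),
--     ((3, 3), (0, 5)),
--     ((4, 5), (1, 5)),
--     ((0, 3), (0, 6)),
--     ((3, 5), (1, 6)),
--
--     # Single diagonal island parts.
--     ((1, 6), (2, 4)),
--     ((6, 3), (3, 4)),
--
--     # 2x2 with single island.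
--     ((2, 2), (2, 5)),
--     ((4, 2), (3, 5)),
--     ((1, 3), (2, 6)),
--     ((0, 6), (3, 6)),
--
--     # 2x2 with '+'-formation islands.
--     ((5, 4), (4, 5)),
--     ((2, 6), (5, 5)),
--     ((3, 6), (4, 6)),
--     ((2, 5), (5, 6)),
--
--     # Empty patches.
--     ((5, 6), (6, 5)),
--     ((6, 6), (6, 6)),
-- )
--
-- def reorder_combinations(combinations, grid_width: int, grid_height: int):
--     # Flatten grid mapping row-wise into a linear mapping. Exclude cells that are outside the target grid.
--     # The grid used in the reordering mapping is always 7x7 (TileD terrain grid).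
--     reordering = [
--         (source_x + source_y * TILED_TERRAIN_WIDTH, target_x + target_y * TILED_TERRAIN_WIDTH)
--         for (source_x, source_y), (target_x, target_y) in REORDERING
--         if target_x < grid_width and target_y < grid_height
--     ]
--     reordering.sort(key=lambda mapping: mapping[1])
--
--     # Check for source or target duplicates.
--     sources = [source for source, target in reordering]
--     targets = [target for source, target in reordering]
--     assert(len(sources) == len(set(sources)))
--     assert(len(targets) == len(set(targets)))
--
--     # Reorder indices that are out of bound are for padding (empty) tiles. For those, include an empty combination.
--     return [
--         combinations[source] if source < len(combinations) else ()
--         for source in sources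
--     ]
-- ===== SOURCE B (Python) =====
-- # The REORDERING table's targets cover every cell of the 7x7 grid exactly once,
-- # so the whole mapping is just one flat permutation: source linear index per
-- # target cell, row-major.
-- SOURCE_OF_TARGET = [
--     0, 4, 5, 1, 30, 31, 25,
--     8, 12, 13, 9, 32, 46, 35,
--     10, 14, 15, 11, 26, 36, 34,
--     2, 6, 7, 3, 19, 20, 17,
--     23, 28, 43, 27, 29, 41, 40,
--     24, 39, 16, 18, 33, 44, 47,
--     21, 38, 22, 42, 45, 37, 48,
-- ]
--
-- def reorder_combinations(combinations, grid_width: int, grid_height: int):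
--     n = len(combinations)
--     result = []
--     for target_y in range(min(grid_height, 7)):
--         for target_x in range(min(grid_width, 7)):
--             source = SOURCE_OF_TARGET[target_x + target_y * 7]
--             result.append(combinations[source] if source < n else ())
--     return result
-- ===== Notes on version B (the rewrite author's own statement) =====
-- stated objective: alternative
-- what changed: Replaces A's filter-of-the-pair-table + sort-by-target + duplicate asserts with a single precomputed flat 49-entry permutation array (source index per target cell) and a row-major walk of the 7-capped target grid indexing it directly.
import Mathlib
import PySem

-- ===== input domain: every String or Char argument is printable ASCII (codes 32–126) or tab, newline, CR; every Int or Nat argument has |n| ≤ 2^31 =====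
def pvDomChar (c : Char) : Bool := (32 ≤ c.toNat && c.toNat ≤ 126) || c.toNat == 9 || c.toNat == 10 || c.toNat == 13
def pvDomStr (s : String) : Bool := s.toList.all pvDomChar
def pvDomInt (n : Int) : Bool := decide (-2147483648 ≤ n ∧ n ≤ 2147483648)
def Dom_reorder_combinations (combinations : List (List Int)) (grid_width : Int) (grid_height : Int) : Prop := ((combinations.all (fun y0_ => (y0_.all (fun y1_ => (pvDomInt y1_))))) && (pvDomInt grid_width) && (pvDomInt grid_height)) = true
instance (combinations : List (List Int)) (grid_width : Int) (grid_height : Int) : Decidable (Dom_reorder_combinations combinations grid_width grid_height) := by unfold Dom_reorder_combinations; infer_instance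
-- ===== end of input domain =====

-- B replaces A's filter + sort + duplicate asserts by one precomputed flat 49-entry permutation
-- array indexed during a row-major walk of the capped target grid; objective: alternative, not speed.

-- ===== PORT A =====
-- The REORDERING table (shared module constant; TILED_TERRAIN_WIDTH = 7).
def pvREORDERING : List ((Int × Int) × (Int × Int)) := [
  ((0, 0), (0, 0)), ((4, 0), (1, 0)), ((5, 0), (2, 0)), ((1, 1), (0, 1)), ((5, 1), (1, 1)),
  ((6, 1), (2, 1)), ((3, 1), (0, 2)), ((0, 2), (1, 2)), ((1, 2), (2, 2)), ((1, 0), (3, 0)),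
  ((2, 1), (3, 1)), ((4, 1), (3, 2)), ((2, 0), (0, 3)), ((6, 0), (1, 3)), ((0, 1), (2, 3)),
  ((3, 0), (3, 3)), ((2, 4), (4, 0)), ((3, 4), (5, 0)), ((4, 3), (6, 0)), ((4, 4), (4, 1)),
  ((4, 6), (5, 1)), ((0, 5), (6, 1)), ((5, 3), (4, 2)), ((1, 5), (5, 2)), ((6, 4), (6, 2)),
  ((5, 2), (4, 3)), ((6, 2), (5, 3)), ((3, 2), (6, 3)), ((1, 4), (4, 4)), ((6, 5), (5, 4)),
  ((5, 5), (6, 4)), ((2, 3), (0, 4)), ((0, 4), (1, 4)), ((3, 3), (0, 5)), ((4, 5), (1, 5)),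
  ((0, 3), (0, 6)), ((3, 5), (1, 6)), ((1, 6), (2, 4)), ((6, 3), (3, 4)), ((2, 2), (2, 5)),
  ((4, 2), (3, 5)), ((1, 3), (2, 6)), ((0, 6), (3, 6)), ((5, 4), (4, 5)), ((2, 6), (5, 5)),
  ((3, 6), (4, 6)), ((2, 5), (5, 6)), ((5, 6), (6, 5)), ((6, 6), (6, 6))]

def reorder_combinations (combinations : List (List Int)) (grid_width : Int) (grid_height : Int) : List (List Int) :=
  -- list comprehension with filter = filter then map
  let reordering :=
    (pvREORDERING.filter (fun m => decide (m.2.1 < grid_width) && decide (m.2.2 < grid_height))).map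
      (fun m => (m.1.1 + m.1.2 * 7, m.2.1 + m.2.2 * 7))
  let reordering := PySem.List.sorted reordering (fun m => m.2) false
  let sources := reordering.map (fun m => m.1)
  -- the two asserts always succeed (sources and targets of the table are pairwise distinct
  -- and filtering preserves distinctness), so they are no-ops here.
  sources.map (fun s =>
    if s < (combinations.length : Int) then PySem.List.pyGetD combinations s [] else [])

-- ===== PORT B =====
-- B's flat constant: source linear index for each target cell of the 7x7 grid, row-major.
def pvSOURCE_OF_TARGET : List Int := [
  0, 4, 5, 1, 30, 31, 25,
  8, 12, 13, 9, 32, 46, 35,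
  10, 14, 15, 11, 26, 36, 34,
  2, 6, 7, 3, 19, 20, 17,
  23, 28, 43, 27, 29, 41, 40,
  24, 39, 16, 18, 33, 44, 47,
  21, 38, 22, 42, 45, 37, 48]

def reorder_combinations_alt (combinations : List (List Int)) (grid_width : Int) (grid_height : Int) : List (List Int) :=
  -- the walked index tx + ty*7 is always in [0, 48], so the plain Python index never raises;
  -- pyGetD with default 0 is exact there.
  (PySem.List.pyRange 0 (min grid_height 7) 1).foldl (fun result target_y =>
    (PySem.List.pyRange 0 (min grid_width 7) 1).foldl (fun result target_x =>
      let source := PySem.List.pyGetD pvSOURCE_OF_TARGET (target_x + target_y * 7) 0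
      result ++ [if source < (combinations.length : Int)
                 then PySem.List.pyGetD combinations source [] else []]) result) []

-- ===== PRECONDITION & SPEC =====
def Spec_reorder_combinations (combinations : List (List Int)) (grid_width : Int) (grid_height : Int) (out : List (List Int)) : Prop := out = reorder_combinations_alt combinations grid_width grid_height
instance (combinations : List (List Int)) (grid_width : Int) (grid_height : Int) (out : List (List Int)) : Decidable (Spec_reorder_combinations combinations grid_width grid_height out) := by unfold Spec_reorder_combinations; infer_instance

-- ===== CLAIM (what is proved, stated in full; the proofs are below) =====
def Claim_equal_reorder_combinations : Prop := ∀ (combinations : List (List Int)) (grid_width : Int) (grid_height : Int), Dom_reorder_combinations combinations grid_width grid_height → Spec_reorder_combinations combinations grid_width grid_height (reorder_combinations combinations grid_width grid_height)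

-- ===== LEMMAS AND PROOFS =====

-- A's source-index list (everything in A before the final element lookup; closed in combinations).
def pvAsrc (w h : Int) : List Int :=
  (PySem.List.sorted
    ((pvREORDERING.filter (fun m => decide (m.2.1 < w) && decide (m.2.2 < h))).map
      (fun m => (m.1.1 + m.1.2 * 7, m.2.1 + m.2.2 * 7)))
    (fun m => m.2) false).map (fun m => m.1)

-- B's source-index list (B's grid walk, collecting sources instead of looked-up rows).
def pvBsrc (w h : Int) : List Int :=
  (PySem.List.pyRange 0 (min h 7) 1).foldl (fun acc ty =>
    (PySem.List.pyRange 0 (min w 7) 1).foldl (fun acc2 tx =>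
      acc2 ++ [PySem.List.pyGetD pvSOURCE_OF_TARGET (tx + ty * 7) 0]) acc) []

-- Every target coordinate in the table lies in the 7x7 grid.
lemma pvtbl_bounds : ∀ m ∈ pvREORDERING, 0 ≤ m.2.1 ∧ m.2.1 ≤ 6 ∧ 0 ≤ m.2.2 ∧ m.2.2 ≤ 6 := by decide

-- A depends on (grid_width, grid_height) only through their clamp to [0, 7].
lemma pvA_clamp (c : List (List Int)) (w h : Int) :
    reorder_combinations c w h = reorder_combinations c (max 0 (min w 7)) (max 0 (min h 7)) := by
  unfold reorder_combinations
  have hfil : pvREORDERING.filter (fun m => decide (m.2.1 < w) && decide (m.2.2 < h))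
      = pvREORDERING.filter
          (fun m => decide (m.2.1 < max 0 (min w 7)) && decide (m.2.2 < max 0 (min h 7))) := by
    apply List.filter_congr
    intro m hm
    have hb := pvtbl_bounds m hm
    have h1 : (m.2.1 < w) ↔ (m.2.1 < max 0 (min w 7)) := by omega
    have h2 : (m.2.2 < h) ↔ (m.2.2 < max 0 (min h 7)) := by omega
    rw [show decide (m.2.1 < w) = decide (m.2.1 < max 0 (min w 7)) from decide_eq_decide.mpr h1,
        show decide (m.2.2 < h) = decide (m.2.2 < max 0 (min h 7)) from decide_eq_decide.mpr h2]
  rw [hfil]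

-- B likewise.
lemma pvB_clamp (c : List (List Int)) (w h : Int) :
    reorder_combinations_alt c w h
      = reorder_combinations_alt c (max 0 (min w 7)) (max 0 (min h 7)) := by
  unfold reorder_combinations_alt
  have hr : ∀ a : Int, PySem.List.pyRange 0 (min a 7) 1
      = PySem.List.pyRange 0 (min (max 0 (min a 7)) 7) 1 := by
    intro a
    by_cases ha : 0 ≤ a
    · congr 1; omega
    · rw [PySem.List.pyRange_one_eq_nil (by omega), PySem.List.pyRange_one_eq_nil (by omega)]
  rw [hr w, hr h]

-- A is the element lookup mapped over its source list (definitional).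
lemma pvA_eval (c : List (List Int)) (w h : Int) :
    reorder_combinations c w h
      = (pvAsrc w h).map (fun s =>
          if s < (c.length : Int) then PySem.List.pyGetD c s [] else []) := rfl

-- B's inner fold commutes with mapping the lookup over collected sources.
lemma pvB_inner (f : Int → List Int) (cols : List Int) (ty : Int) (acc0 : List Int) :
    cols.foldl (fun a2 tx =>
        a2 ++ [f (PySem.List.pyGetD pvSOURCE_OF_TARGET (tx + ty * 7) 0)]) (acc0.map f)
      = (cols.foldl (fun a2 tx =>
          a2 ++ [PySem.List.pyGetD pvSOURCE_OF_TARGET (tx + ty * 7) 0]) acc0).map f := by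
  induction cols generalizing acc0 with
  | nil => rfl
  | cons tx rest ih =>
    simp only [List.foldl_cons]
    simpa using ih (acc0 ++ [PySem.List.pyGetD pvSOURCE_OF_TARGET (tx + ty * 7) 0])

-- B's nested fold commutes with mapping the lookup over collected sources.
lemma pvB_outer (f : Int → List Int) (cols rows : List Int) (acc0 : List Int) :
    rows.foldl (fun acc ty =>
        cols.foldl (fun a2 tx =>
          a2 ++ [f (PySem.List.pyGetD pvSOURCE_OF_TARGET (tx + ty * 7) 0)]) acc) (acc0.map f)
      = (rows.foldl (fun acc ty =>
          cols.foldl (fun a2 tx =>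
            a2 ++ [PySem.List.pyGetD pvSOURCE_OF_TARGET (tx + ty * 7) 0]) acc) acc0).map f := by
  induction rows generalizing acc0 with
  | nil => rfl
  | cons ty rest ih =>
    simp only [List.foldl_cons]
    rw [pvB_inner f cols ty acc0]
    exact ih _

-- B is the element lookup mapped over its source list.
set_option maxRecDepth 100000 in
lemma pvB_eval (c : List (List Int)) (w h : Int) :
    reorder_combinations_alt c w h
      = (pvBsrc w h).map (fun s =>
          if s < (c.length : Int) then PySem.List.pyGetD c s [] else []) := by
  unfold reorder_combinations_alt pvBsrc
  exact pvB_outer (fun s => if s < (c.length : Int) then PySem.List.pyGetD c s [] else [])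
    (PySem.List.pyRange 0 (min w 7) 1) (PySem.List.pyRange 0 (min h 7) 1) []

-- The two source lists agree on the clamped grid sizes (checked by the kernel, 64 cases).
lemma pvsrc_agree : ∀ w ∈ PySem.List.pyRange 0 8 1, ∀ h ∈ PySem.List.pyRange 0 8 1,
    pvAsrc w h = pvBsrc w h := by
  set_option maxRecDepth 100000 in decide

-- ===== VERDICT (by name: the statement is the Claim_ definition above) =====
set_option maxRecDepth 8000 in
theorem reorder_combinations_spec : Claim_equal_reorder_combinations := by
  intro c w h _
  unfold Spec_reorder_combinations
  rw [pvA_clamp, pvB_clamp, pvA_eval, pvB_eval]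
  rw [pvsrc_agree _ (by rw [PySem.List.mem_pyRange_one]; omega)
        _ (by rw [PySem.List.mem_pyRange_one]; omega)]
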